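-- pv_equiv track=rewrite | github.com/Data-Provenance-Initiative/Data-Provenance-Collection | src/web_analysis/robots_util.py | agent_and_operation_detailed
-- ===== SOURCE A (Python) =====
-- def agent_and_operation_detailed(agent_statuses):
--     """Given a list of agent statuses, return the strictest designation."""
--     if "all" in agent_statuses:
--         return "all"
--     elif any(status.startswith("some") for status in agent_statuses):
--         some_categories = [
--             status for status in agent_statuses if status.startswith("some")
--         ]
--         if "some_pattern_restrictions" in some_categories:
--             return "some_pattern_restrictions"
--         elif "some_disallow_file_types" in some_categories:
--             return "some_disallow_file_types"
--         elif "some_disallow_important_dir" in some_categories: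
--             return "some_disallow_important_dir"
--         else:
--             return "some_other"
--     elif any(status.startswith("none") for status in agent_statuses):
--         none_categories = [
--             status for status in agent_statuses if status.startswith("none")
--         ]
--         if "none_crawl_delay" in none_categories:
--             return "none_crawl_delay"
--         elif "none_sitemap" in none_categories:
--             return "none_sitemap"
--         else:
--             return "none"
--     else:
--         return "no_robots"
-- ===== SOURCE B (Python) =====
-- def _rank(s):
--     if s == "all":
--         return 0
--     if s == "some_pattern_restrictions":
--         return 1
--     if s == "some_disallow_file_types":
--         return 2
--     if s == "some_disallow_important_dir":
--         return 3
--     if s.startswith("some"):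
--         return 4
--     if s == "none_crawl_delay":
--         return 5
--     if s == "none_sitemap":
--         return 6
--     if s.startswith("none"):
--         return 7
--     return 8
--
--
-- def _designation(r):
--     if r == 0:
--         return "all"
--     if r == 1:
--         return "some_pattern_restrictions"
--     if r == 2:
--         return "some_disallow_file_types"
--     if r == 3:
--         return "some_disallow_important_dir"
--     if r == 4:
--         return "some_other"
--     if r == 5:
--         return "none_crawl_delay"
--     if r == 6:
--         return "none_sitemap"
--     if r == 7:
--         return "none"
--     return "no_robots"
--
--
-- def agent_and_operation_detailed(agent_statuses):
--     """Given a list of agent statuses, return the strictest designation."""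
--     r = 8
--     for s in agent_statuses:
--         r = min(r, _rank(s))
--     return _designation(r)
-- ===== Notes on version B (the rewrite author's own statement) =====
-- stated objective: simpler
-- what changed: Replaces the nested membership/startswith branch cascade with a per-status strictness rank, a single min-fold over the list, and a rank-to-designation lookup.
import Mathlib
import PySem

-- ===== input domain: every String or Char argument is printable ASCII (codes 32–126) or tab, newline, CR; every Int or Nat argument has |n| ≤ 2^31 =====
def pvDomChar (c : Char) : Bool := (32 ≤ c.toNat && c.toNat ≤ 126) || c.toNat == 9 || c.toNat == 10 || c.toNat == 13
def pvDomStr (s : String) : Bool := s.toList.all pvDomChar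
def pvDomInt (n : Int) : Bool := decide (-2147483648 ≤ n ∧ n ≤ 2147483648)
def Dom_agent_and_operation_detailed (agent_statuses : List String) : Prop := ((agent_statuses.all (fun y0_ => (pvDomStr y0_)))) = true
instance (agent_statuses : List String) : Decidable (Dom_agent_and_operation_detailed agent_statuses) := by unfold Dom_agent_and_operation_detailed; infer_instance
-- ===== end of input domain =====

-- B replaces A's nested membership/startswith branch cascade with a per-status
-- strictness rank, one min-fold over the list, and a rank→designation lookup (objective: simpler).


-- ===== PORT A =====
def agent_and_operation_detailed (agent_statuses : List String) : String :=
  if "all" ∈ agent_statuses then "all"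
  else if agent_statuses.any (fun status => PySem.Str.startswith status "some") then
    let some_categories := agent_statuses.filter (fun status => PySem.Str.startswith status "some")
    if "some_pattern_restrictions" ∈ some_categories then "some_pattern_restrictions"
    else if "some_disallow_file_types" ∈ some_categories then "some_disallow_file_types"
    else if "some_disallow_important_dir" ∈ some_categories then "some_disallow_important_dir"
    else "some_other"
  else if agent_statuses.any (fun status => PySem.Str.startswith status "none") then
    let none_categories := agent_statuses.filter (fun status => PySem.Str.startswith status "none")
    if "none_crawl_delay" ∈ none_categories then "none_crawl_delay"
    else if "none_sitemap" ∈ none_categories then "none_sitemap"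
    else "none"
  else "no_robots"

-- ===== PORT B =====
def pvRank (s : String) : Nat :=
  if s = "all" then 0
  else if s = "some_pattern_restrictions" then 1
  else if s = "some_disallow_file_types" then 2
  else if s = "some_disallow_important_dir" then 3
  else if PySem.Str.startswith s "some" then 4
  else if s = "none_crawl_delay" then 5
  else if s = "none_sitemap" then 6
  else if PySem.Str.startswith s "none" then 7
  else 8

def pvDesignation (r : Nat) : String :=
  if r = 0 then "all"
  else if r = 1 then "some_pattern_restrictions"
  else if r = 2 then "some_disallow_file_types"
  else if r = 3 then "some_disallow_important_dir"
  else if r = 4 then "some_other"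
  else if r = 5 then "none_crawl_delay"
  else if r = 6 then "none_sitemap"
  else if r = 7 then "none"
  else "no_robots"

def agent_and_operation_detailed_alt (agent_statuses : List String) : String :=
  pvDesignation (agent_statuses.foldl (fun r s => min r (pvRank s)) 8)

-- ===== PRECONDITION & SPEC =====
def Spec_agent_and_operation_detailed (agent_statuses : List String) (out : String) : Prop := out = agent_and_operation_detailed_alt agent_statuses
instance (agent_statuses : List String) (out : String) : Decidable (Spec_agent_and_operation_detailed agent_statuses out) := by unfold Spec_agent_and_operation_detailed; infer_instance

-- ===== CLAIM (what is proved, stated in full; the proofs are below) =====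
def Claim_equal_agent_and_operation_detailed : Prop := ∀ (agent_statuses : List String), Dom_agent_and_operation_detailed agent_statuses → Spec_agent_and_operation_detailed agent_statuses (agent_and_operation_detailed agent_statuses)

-- ===== LEMMAS AND PROOFS =====

-- the min-fold never exceeds its initial accumulator
theorem pvFold_le_init (xs : List String) (a : Nat) :
    xs.foldl (fun r t => min r (pvRank t)) a ≤ a := by
  induction xs generalizing a with
  | nil => simp
  | cons x t ih =>
    simp only [List.foldl_cons]
    exact le_trans (ih _) (by omega)

-- the min-fold is ≤ the rank of every member
theorem pvFold_le_mem (xs : List String) (a : Nat) (s : String) (hs : s ∈ xs) :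
    xs.foldl (fun r t => min r (pvRank t)) a ≤ pvRank s := by
  induction xs generalizing a with
  | nil => cases hs
  | cons x t ih =>
    simp only [List.foldl_cons]
    rcases List.mem_cons.mp hs with h | h
    · subst h
      exact le_trans (pvFold_le_init t _) (min_le_right _ _)
    · exact ih _ h

-- a lower bound on the init and on every member's rank is a lower bound on the fold
theorem pvLe_fold (xs : List String) (a k : Nat) (ha : k ≤ a)
    (h : ∀ s ∈ xs, k ≤ pvRank s) :
    k ≤ xs.foldl (fun r t => min r (pvRank t)) a := by
  induction xs generalizing a with
  | nil => simpa using ha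
  | cons x t ih =>
    simp only [List.foldl_cons]
    exact ih _ (le_min ha (h x (List.mem_cons_self))) (fun s hs => h s (List.mem_cons_of_mem _ hs))

theorem pvRank_ge1 (s : String) (h0 : s ≠ "all") : 1 ≤ pvRank s := by
  unfold pvRank; split_ifs <;> first | omega | simp_all

theorem pvRank_ge2 (s : String) (h0 : s ≠ "all") (h1 : s ≠ "some_pattern_restrictions") :
    2 ≤ pvRank s := by
  unfold pvRank; split_ifs <;> first | omega | simp_all

theorem pvRank_ge3 (s : String) (h0 : s ≠ "all") (h1 : s ≠ "some_pattern_restrictions")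
    (h2 : s ≠ "some_disallow_file_types") : 3 ≤ pvRank s := by
  unfold pvRank; split_ifs <;> first | omega | simp_all

theorem pvRank_ge4 (s : String) (h0 : s ≠ "all") (h1 : s ≠ "some_pattern_restrictions")
    (h2 : s ≠ "some_disallow_file_types") (h3 : s ≠ "some_disallow_important_dir") :
    4 ≤ pvRank s := by
  unfold pvRank; split_ifs <;> first | omega | simp_all

theorem pvRank_ge5 (s : String) (h0 : s ≠ "all")
    (hsw : ¬ PySem.Str.startswith s "some" = true) : 5 ≤ pvRank s := by
  unfold pvRank
  split_ifs <;> first | omega | (subst_vars; revert hsw; decide) | simp_all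

theorem pvRank_ge6 (s : String) (h0 : s ≠ "all")
    (hsw : ¬ PySem.Str.startswith s "some" = true) (h5 : s ≠ "none_crawl_delay") :
    6 ≤ pvRank s := by
  unfold pvRank
  split_ifs <;> first | omega | (subst_vars; revert hsw; decide) | simp_all

theorem pvRank_ge7 (s : String) (h0 : s ≠ "all")
    (hsw : ¬ PySem.Str.startswith s "some" = true) (h5 : s ≠ "none_crawl_delay")
    (h6 : s ≠ "none_sitemap") : 7 ≤ pvRank s := by
  unfold pvRank
  split_ifs <;> first | omega | (subst_vars; revert hsw; decide) | simp_all

theorem pvRank_eq8 (s : String) (h0 : s ≠ "all")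
    (hsw : ¬ PySem.Str.startswith s "some" = true)
    (hnw : ¬ PySem.Str.startswith s "none" = true) : pvRank s = 8 := by
  unfold pvRank
  split_ifs <;> first
    | rfl
    | (subst_vars; revert hsw; decide)
    | (subst_vars; revert hnw; decide)
    | simp_all

theorem pvRank_eq4 (s : String) (hsw : PySem.Str.startswith s "some" = true)
    (h1 : s ≠ "some_pattern_restrictions") (h2 : s ≠ "some_disallow_file_types")
    (h3 : s ≠ "some_disallow_important_dir") : pvRank s = 4 := by
  unfold pvRank
  split_ifs <;> first | rfl | (subst_vars; revert hsw; decide)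

theorem pvRank_eq7 (s : String) (hsw : ¬ PySem.Str.startswith s "some" = true)
    (hnw : PySem.Str.startswith s "none" = true)
    (h5 : s ≠ "none_crawl_delay") (h6 : s ≠ "none_sitemap") : pvRank s = 7 := by
  unfold pvRank
  split_ifs <;> first
    | rfl
    | (subst_vars; revert hsw; decide)
    | (subst_vars; revert hnw; decide)

theorem pvFold_eq (xs : List String) (k : Nat) (hk : k ≤ 8)
    (hub : ∃ s ∈ xs, pvRank s = k) (hlb : ∀ s ∈ xs, k ≤ pvRank s) :
    xs.foldl (fun r t => min r (pvRank t)) 8 = k := by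
  obtain ⟨s, hs, hr⟩ := hub
  have h1 := pvFold_le_mem xs 8 s hs
  have h2 := pvLe_fold xs 8 k hk hlb
  omega

theorem pvMemFilterSome (xs : List String) (s : String)
    (hs : s ∈ xs) (hp : PySem.Str.startswith s "some" = true) :
    s ∈ xs.filter (fun status => PySem.Str.startswith status "some") :=
  List.mem_filter.mpr ⟨hs, hp⟩

theorem pvMemFilterNone (xs : List String) (s : String)
    (hs : s ∈ xs) (hp : PySem.Str.startswith s "none" = true) :
    s ∈ xs.filter (fun status => PySem.Str.startswith status "none") :=
  List.mem_filter.mpr ⟨hs, hp⟩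

theorem agent_and_operation_detailed_spec' (xs : List String) :
    agent_and_operation_detailed xs = agent_and_operation_detailed_alt xs := by
  unfold agent_and_operation_detailed agent_and_operation_detailed_alt
  by_cases hAll : "all" ∈ xs
  · rw [if_pos hAll,
      pvFold_eq xs 0 (by omega) ⟨"all", hAll, by decide⟩ (fun s _ => Nat.zero_le _)]
    decide
  · rw [if_neg hAll]
    by_cases hSome : (xs.any fun status => PySem.Str.startswith status "some") = true
    · rw [if_pos hSome]
      simp only []
      by_cases hSpr : "some_pattern_restrictions"
          ∈ xs.filter (fun status => PySem.Str.startswith status "some")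
      · rw [if_pos hSpr,
          pvFold_eq xs 1 (by omega) ⟨_, (List.mem_filter.mp hSpr).1, by decide⟩
            (fun s hs => pvRank_ge1 s (fun e => hAll (e ▸ hs)))]
        decide
      · rw [if_neg hSpr]
        have hne1 : ∀ s ∈ xs, s ≠ "some_pattern_restrictions" :=
          fun s hs e => hSpr (e ▸ pvMemFilterSome xs s hs (by subst e; decide))
        by_cases hSdft : "some_disallow_file_types"
            ∈ xs.filter (fun status => PySem.Str.startswith status "some")
        · rw [if_pos hSdft,
            pvFold_eq xs 2 (by omega) ⟨_, (List.mem_filter.mp hSdft).1, by decide⟩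
              (fun s hs => pvRank_ge2 s (fun e => hAll (e ▸ hs)) (hne1 s hs))]
          decide
        · rw [if_neg hSdft]
          have hne2 : ∀ s ∈ xs, s ≠ "some_disallow_file_types" :=
            fun s hs e => hSdft (e ▸ pvMemFilterSome xs s hs (by subst e; decide))
          by_cases hSdid : "some_disallow_important_dir"
              ∈ xs.filter (fun status => PySem.Str.startswith status "some")
          · rw [if_pos hSdid,
              pvFold_eq xs 3 (by omega) ⟨_, (List.mem_filter.mp hSdid).1, by decide⟩
                (fun s hs => pvRank_ge3 s (fun e => hAll (e ▸ hs)) (hne1 s hs) (hne2 s hs))]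
            decide
          · rw [if_neg hSdid]
            have hne3 : ∀ s ∈ xs, s ≠ "some_disallow_important_dir" :=
              fun s hs e => hSdid (e ▸ pvMemFilterSome xs s hs (by subst e; decide))
            obtain ⟨s, hs, hw⟩ := List.any_eq_true.mp hSome
            rw [pvFold_eq xs 4 (by omega)
                ⟨s, hs, pvRank_eq4 s hw (hne1 s hs) (hne2 s hs) (hne3 s hs)⟩
                (fun t ht => pvRank_ge4 t (fun e => hAll (e ▸ ht))
                  (hne1 t ht) (hne2 t ht) (hne3 t ht))]
            decide
    · rw [if_neg hSome]
      have hnosome : ∀ t ∈ xs, ¬ PySem.Str.startswith t "some" = true :=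
        fun t ht hc => hSome (List.any_eq_true.mpr ⟨t, ht, hc⟩)
      by_cases hNone : (xs.any fun status => PySem.Str.startswith status "none") = true
      · rw [if_pos hNone]
        simp only []
        by_cases hNcd : "none_crawl_delay"
            ∈ xs.filter (fun status => PySem.Str.startswith status "none")
        · rw [if_pos hNcd,
            pvFold_eq xs 5 (by omega) ⟨_, (List.mem_filter.mp hNcd).1, by decide⟩
              (fun s hs => pvRank_ge5 s (fun e => hAll (e ▸ hs)) (hnosome s hs))]
          decide
        · rw [if_neg hNcd]
          have hne5 : ∀ s ∈ xs, s ≠ "none_crawl_delay" :=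
            fun s hs e => hNcd (e ▸ pvMemFilterNone xs s hs (by subst e; decide))
          by_cases hNs : "none_sitemap"
              ∈ xs.filter (fun status => PySem.Str.startswith status "none")
          · rw [if_pos hNs,
              pvFold_eq xs 6 (by omega) ⟨_, (List.mem_filter.mp hNs).1, by decide⟩
                (fun s hs => pvRank_ge6 s (fun e => hAll (e ▸ hs)) (hnosome s hs) (hne5 s hs))]
            decide
          · rw [if_neg hNs]
            have hne6 : ∀ s ∈ xs, s ≠ "none_sitemap" :=
              fun s hs e => hNs (e ▸ pvMemFilterNone xs s hs (by subst e; decide))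
            obtain ⟨s, hs, hw⟩ := List.any_eq_true.mp hNone
            rw [pvFold_eq xs 7 (by omega)
                ⟨s, hs, pvRank_eq7 s (hnosome s hs) hw (hne5 s hs) (hne6 s hs)⟩
                (fun t ht => pvRank_ge7 t (fun e => hAll (e ▸ ht)) (hnosome t ht)
                  (hne5 t ht) (hne6 t ht))]
            decide
      · rw [if_neg hNone]
        have hall8 : ∀ t ∈ xs, pvRank t = 8 := fun t ht =>
          pvRank_eq8 t (fun e => hAll (e ▸ ht)) (hnosome t ht)
            (fun hc => hNone (List.any_eq_true.mpr ⟨t, ht, hc⟩))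
        rw [le_antisymm (pvFold_le_init xs 8)
          (pvLe_fold xs 8 8 le_rfl (fun s hs => (hall8 s hs).ge))]
        decide

-- ===== VERDICT (by name: the statement is the Claim_ definition above) =====
theorem agent_and_operation_detailed_spec : Claim_equal_agent_and_operation_detailed := by
  intro xs _
  unfold Spec_agent_and_operation_detailed
  exact agent_and_operation_detailed_spec' xs
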